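-- pv_equiv track=rewrite | github.com/ikokkari/PythonProblems | labs109.py | goodstein
-- ===== SOURCE A (Python) =====
-- def goodstein(n, k):
--     g, i = n, 2
--     while i <= k and g > 0:
--         coeff, gg = [], g
--         while gg > 0:
--             coeff.append(gg % i)
--             gg = gg // i
--         gg, p = 0, 1
--         for c in coeff:
--             gg = gg + c * p
--             p = p * (i + 1)
--         g = gg - 1
--         i += 1
--     return g
-- ===== SOURCE B (Python) =====
-- def goodstein(n, k):
--     if k < 2 or n <= 0:
--         return n
--     # base-2 digits of n, little-endian
--     digits, m = [], n
--     while m > 0: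
--         digits.append(m % 2)
--         m //= 2
--     i = 2
--     while i <= k and digits:
--         # digits (all < i) reinterpreted in base i+1; subtract 1 by borrowing
--         j = 0
--         while digits[j] == 0:
--             digits[j] = i
--             j += 1
--         digits[j] -= 1
--         while digits and digits[-1] == 0:
--             digits.pop()
--         i += 1
--     # evaluate the digit list in the final base i (Horner)
--     v = 0
--     for d in reversed(digits):
--         v = v * i + d
--     return v
-- ===== Notes on version B (the rewrite author's own statement) =====
-- stated objective: faster
-- what changed: Instead of converting the integer to base-i digits and re-summing them in base i+1 on every step, B converts n to its digit list once, keeps that list across all steps (reinterpreting it in the next base is implicit) and performs each step as a decrement-with-borrow on the digits, converting back to an integer only after the loop ends.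
import Mathlib
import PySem

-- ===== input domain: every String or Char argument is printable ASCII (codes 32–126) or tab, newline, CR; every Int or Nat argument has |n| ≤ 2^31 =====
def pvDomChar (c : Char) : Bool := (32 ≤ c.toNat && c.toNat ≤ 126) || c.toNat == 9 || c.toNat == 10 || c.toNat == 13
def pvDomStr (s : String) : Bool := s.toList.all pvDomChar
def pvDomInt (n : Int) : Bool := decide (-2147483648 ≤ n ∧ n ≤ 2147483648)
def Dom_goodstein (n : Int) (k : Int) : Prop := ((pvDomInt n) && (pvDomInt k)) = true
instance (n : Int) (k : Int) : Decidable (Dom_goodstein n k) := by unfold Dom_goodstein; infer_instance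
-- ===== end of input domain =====

-- B keeps n's digit list across all steps (each step = decrement-with-borrow on the digits; one final Horner
-- evaluation), instead of A's per-step integer->digits->integer rebase; objective: faster (no per-step big-int rebuild).


-- ===== PORT A =====
-- inner 'while gg > 0' digit-collecting loop; 'fuel' only totalizes the recursion
-- (always called with fuel = gg.toNat, enough steps since the loop divides by i ≥ 2)
def pyDigitsA (i : Int) : Nat → Int → List Int
  | 0, _ => []
  | fuel + 1, gg =>
    if 0 < gg then PySem.Int.mod gg i :: pyDigitsA i fuel (PySem.Int.floordiv gg i) else []

-- the 'for c in coeff: gg, p = gg + c*p, p*(i+1)' re-summing pass over the collected digits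
def pyResumA (i : Int) (coeff : List Int) (s : Int × Int) : Int × Int :=
  coeff.foldl (fun s c => (s.1 + c * s.2, s.2 * (i + 1))) s

-- outer 'while i <= k and g > 0' loop; fuel = number of remaining values of i, i.e. (k - i + 1).toNat
def goodsteinLoopA : Nat → Int → Int → Int → Int
  | 0, g, _, _ => g
  | fuel + 1, g, i, k =>
    if i ≤ k ∧ 0 < g then
      goodsteinLoopA fuel ((pyResumA i (pyDigitsA i g.toNat g) (0, 1)).1 - 1) (i + 1) k
    else g

def goodstein (n : Int) (k : Int) : Int := goodsteinLoopA (k - 1).toNat n 2 k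

-- ===== PORT B =====
-- 'while m > 0: digits.append(m % 2); m //= 2' — base-2 digits of n, little-endian (fuel totalizes, = m.toNat)
def digitsB : Nat → Int → List Int
  | 0, _ => []
  | fuel + 1, m =>
    if 0 < m then PySem.Int.mod m 2 :: digitsB fuel (PySem.Int.floordiv m 2) else []

-- the borrow scan 'j = 0; while digits[j] == 0: digits[j] = i; j += 1; digits[j] -= 1'
-- ([] is unreachable: the loop body runs only when a nonzero digit exists)
def borrowSub1 (i : Int) : List Int → List Int
  | [] => []
  | d :: t => if d = 0 then i :: borrowSub1 i t else (d - 1) :: t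

-- 'while digits and digits[-1] == 0: digits.pop()' — drop trailing zeros (pop from the end)
def stripZeros (ds : List Int) : List Int := (ds.reverse.dropWhile (fun d => d == 0)).reverse

-- outer 'while i <= k and digits' loop; same fuel shape as A's outer loop
def loopB (k : Int) : Nat → List Int → Int → List Int × Int
  | 0, ds, i => (ds, i)
  | fuel + 1, ds, i =>
    if i ≤ k ∧ ds ≠ [] then loopB k fuel (stripZeros (borrowSub1 i ds)) (i + 1) else (ds, i)

-- 'v = 0; for d in reversed(digits): v = v * i + d'
def hornerB (i : Int) (ds : List Int) : Int := ds.reverse.foldl (fun v d => v * i + d) 0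

def goodstein_alt (n : Int) (k : Int) : Int :=
  if k < 2 ∨ n ≤ 0 then n
  else
    let r := loopB k (k - 1).toNat (digitsB n.toNat n) 2
    hornerB r.2 r.1

-- ===== PRECONDITION & SPEC =====
def Spec_goodstein (n : Int) (k : Int) (out : Int) : Prop := out = goodstein_alt n k
instance (n : Int) (k : Int) (out : Int) : Decidable (Spec_goodstein n k out) := by unfold Spec_goodstein; infer_instance

-- ===== CLAIM (what is proved, stated in full; the proofs are below) =====
def Claim_equal_goodstein : Prop := ∀ (n : Int) (k : Int), Dom_goodstein n k → Spec_goodstein n k (goodstein n k)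

-- ===== LEMMAS AND PROOFS =====

-- value of a little-endian digit list in base b
def valD (b : Int) : List Int → Int
  | [] => 0
  | d :: t => d + b * valD b t

theorem valD_nonneg (b : Int) (hb : 0 ≤ b) (ds : List Int) (h : ∀ d ∈ ds, 0 ≤ d) :
    0 ≤ valD b ds := by
  induction ds with
  | nil => simp [valD]
  | cons d t ih =>
    have hd := h d (by simp)
    have ht := ih (fun x hx => h x (by simp [hx]))
    simp only [valD]
    nlinarith

theorem valD_pos (b : Int) (hb : 1 ≤ b) (ds : List Int)
    (h : ∀ d ∈ ds, 0 ≤ d) (hn : ds.getLast? ≠ some 0) (hne : ds ≠ []) :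
    0 < valD b ds := by
  induction ds with
  | nil => exact absurd rfl hne
  | cons d t ih =>
    have hd := h d (by simp)
    cases t with
    | nil =>
      simp only [List.getLast?_singleton] at hn
      have : d ≠ 0 := by intro hh; exact hn (by rw [hh])
      simp [valD]; omega
    | cons e t' =>
      have ht := ih (fun x hx => h x (by simp [hx]))
        (by simpa [List.getLast?_cons_cons] using hn) (by simp)
      have h0 := valD_nonneg b (by omega) (e :: t') (fun x hx => h x (by simp [hx]))
      simp only [valD] at *
      nlinarith

theorem resum_val (i : Int) (l : List Int) (a p : Int) :
    (pyResumA i l (a, p)).1 = a + p * valD (i + 1) l := by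
  induction l generalizing a p with
  | nil => simp [pyResumA, valD]
  | cons c t ih =>
    simp only [pyResumA, List.foldl, valD] at *
    rw [ih]; ring

theorem pyDigitsA_zero (i : Int) (fuel : Nat) : pyDigitsA i fuel 0 = [] := by
  cases fuel <;> simp [pyDigitsA]

-- A's digit loop recovers any normalized valid representation
theorem digitsA_of_rep (i : Int) (hi : 2 ≤ i) (ds : List Int)
    (hb : ∀ d ∈ ds, 0 ≤ d ∧ d < i) (hn : ds.getLast? ≠ some 0) :
    ∀ fuel, (valD i ds).toNat ≤ fuel → pyDigitsA i fuel (valD i ds) = ds := by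
  induction ds with
  | nil => intro fuel _; simpa [valD] using pyDigitsA_zero i fuel
  | cons d t ih =>
    intro fuel hfuel
    have hd := hb d (by simp)
    have hbt : ∀ x ∈ t, 0 ≤ x ∧ x < i := fun x hx => hb x (by simp [hx])
    have hvt : 0 ≤ valD i t := valD_nonneg i (by omega) t (fun x hx => (hbt x hx).1)
    have hpos : 0 < valD i (d :: t) := by
      cases t with
      | nil =>
        simp only [List.getLast?_singleton] at hn
        have : d ≠ 0 := by intro hh; exact hn (by rw [hh])
        simp [valD]; omega
      | cons e t' =>
        have := valD_pos i (by omega) (e :: t') (fun x hx => (hbt x hx).1)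
          (by simpa [List.getLast?_cons_cons] using hn) (by simp)
        simp only [valD] at *; nlinarith
    have hfuel1 : 1 ≤ fuel := by omega
    obtain ⟨f, rfl⟩ : ∃ f, fuel = f + 1 := ⟨fuel - 1, by omega⟩
    have hg : valD i (d :: t) = d + i * valD i t := rfl
    have hmod : PySem.Int.mod (d + i * valD i t) i = d := by
      rw [PySem.Int.mod_eq_emod_of_pos (by omega)]
      rw [Int.add_mul_emod_self_left, Int.emod_eq_of_lt hd.1 hd.2]
    have hdiv : PySem.Int.floordiv (d + i * valD i t) i = valD i t := by
      rw [PySem.Int.floordiv_eq_ediv_of_pos (by omega)]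
      rw [Int.add_mul_ediv_left _ _ (by omega : i ≠ 0),
        Int.ediv_eq_zero_of_lt hd.1 hd.2, zero_add]
    have hlt : valD i t < valD i (d :: t) := by
      simp only [valD]; nlinarith
    have hnt : t.getLast? ≠ some 0 := by
      cases t with
      | nil => simp
      | cons e t' => simpa [List.getLast?_cons_cons] using hn
    rw [hg, pyDigitsA, if_pos (by omega : (0:Int) < d + i * valD i t), hmod, hdiv,
      ih hbt hnt f (by omega)]

-- B's base-2 digit builder yields a normalized valid representation
theorem digitsB_spec : ∀ (fuel : Nat) (m : Int), 0 ≤ m → m.toNat ≤ fuel →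
    valD 2 (digitsB fuel m) = m ∧ (∀ d ∈ digitsB fuel m, 0 ≤ d ∧ d < 2) ∧
      (digitsB fuel m).getLast? ≠ some 0 := by
  intro fuel
  induction fuel with
  | zero =>
    intro m hm hf
    have : m = 0 := by omega
    subst this; simp [digitsB, valD]
  | succ f ih =>
    intro m hm hf
    by_cases hpos : 0 < m
    · have hmod : PySem.Int.mod m 2 = m % 2 := PySem.Int.mod_eq_emod_of_pos (by omega)
      have hdiv : PySem.Int.floordiv m 2 = m / 2 := PySem.Int.floordiv_eq_ediv_of_pos (by omega)
      have hq0 : 0 ≤ m / 2 := by omega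
      have hqf : (m / 2).toNat ≤ f := by omega
      obtain ⟨hval, hbnd, hlast⟩ := ih (m / 2) hq0 hqf
      rw [digitsB, if_pos hpos, hmod, hdiv]
      refine ⟨by simp only [valD, hval]; omega, ?_, ?_⟩
      · intro d hd
        rcases List.mem_cons.1 hd with h | h
        · subst h; omega
        · exact hbnd d h
      · cases hds : digitsB f (m / 2) with
        | nil =>
          have : m / 2 = 0 := by rw [← hval, hds]; rfl
          simp only [List.getLast?_singleton]
          intro hc
          have : m % 2 = 0 := by exact Option.some.inj hc
          omega
        | cons e t' => rw [← hds]; simpa [hds, List.getLast?_cons_cons] using hlast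
    · rw [digitsB, if_neg hpos]; simp [valD]; omega

-- decrement-with-borrow: value drops by 1 (in base i+1) and digits stay in [0, i+1)
theorem borrow_spec (i : Int) (hi : 2 ≤ i) : ∀ (ds : List Int),
    (∀ d ∈ ds, 0 ≤ d ∧ d < i) → ds.getLast? ≠ some 0 → ds ≠ [] →
    valD (i + 1) (borrowSub1 i ds) = valD (i + 1) ds - 1 ∧
      (∀ d ∈ borrowSub1 i ds, 0 ≤ d ∧ d < i + 1) := by
  intro ds
  induction ds with
  | nil => intro _ _ h; exact absurd rfl h
  | cons d t ih =>
    intro hb hn _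
    have hd := hb d (by simp)
    have hbt : ∀ x ∈ t, 0 ≤ x ∧ x < i := fun x hx => hb x (by simp [hx])
    by_cases hd0 : d = 0
    · subst hd0
      have hne : t ≠ [] := by
        intro hh; subst hh; simp [List.getLast?_singleton] at hn
      have hnt : t.getLast? ≠ some 0 := by
        cases t with
        | nil => exact absurd rfl hne
        | cons e t' => simpa [List.getLast?_cons_cons] using hn
      obtain ⟨hval, hbnd⟩ := ih hbt hnt hne
      rw [borrowSub1, if_pos rfl]
      constructor
      · simp only [valD, hval]; ring
      · intro x hx
        rcases List.mem_cons.1 hx with h | h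
        · subst h; omega
        · exact hbnd x h
    · rw [borrowSub1, if_neg hd0]
      constructor
      · simp only [valD]; ring
      · intro x hx
        rcases List.mem_cons.1 hx with h | h
        · subst h; omega
        · have := hbt x h; omega

theorem head?_dropWhile_not {α : Type} (p : α → Bool) (l : List α) (a : α)
    (h : (l.dropWhile p).head? = some a) : p a = false := by
  induction l with
  | nil => simp [List.dropWhile] at h
  | cons x t ih =>
    by_cases hp : p x = true
    · simp only [List.dropWhile, hp] at h; exact ih h
    · simp only [Bool.not_eq_true] at hp
      simp only [List.dropWhile, hp, List.head?] at h
      rw [← Option.some.inj h]; exact hp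

theorem valD_append_zeros (b : Int) (xs zs : List Int) (hz : ∀ z ∈ zs, z = 0) :
    valD b (xs ++ zs) = valD b xs := by
  induction xs with
  | nil =>
    simp only [List.nil_append, valD]
    induction zs with
    | nil => rfl
    | cons z t ihz =>
      have := hz z (by simp)
      simp only [valD, ihz (fun x hx => hz x (by simp [hx])), this]; ring
  | cons x t ih => simp only [List.cons_append, valD, ih]

-- decomposition produced by 'pop trailing zeros'
theorem strip_decomp (ds : List Int) :
    ∃ zs, ds = stripZeros ds ++ zs ∧ ∀ z ∈ zs, z = 0 := by
  refine ⟨(ds.reverse.takeWhile (fun d => d == 0)).reverse, ?_, ?_⟩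
  · unfold stripZeros
    conv_lhs => rw [← ds.reverse_reverse, ← List.takeWhile_append_dropWhile
      (p := fun d => d == 0) (l := ds.reverse)]
    rw [List.reverse_append]
  · intro z hz
    rw [List.mem_reverse] at hz
    have := List.mem_takeWhile_imp hz
    simpa using this

theorem strip_val (b : Int) (ds : List Int) : valD b (stripZeros ds) = valD b ds := by
  obtain ⟨zs, heq, hz⟩ := strip_decomp ds
  conv_rhs => rw [heq]
  rw [valD_append_zeros b _ zs hz]

theorem strip_mem (ds : List Int) (d : Int) (h : d ∈ stripZeros ds) : d ∈ ds := by
  obtain ⟨zs, heq, _⟩ := strip_decomp ds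
  rw [heq]; exact List.mem_append_left _ h

theorem strip_norm (ds : List Int) : (stripZeros ds).getLast? ≠ some 0 := by
  unfold stripZeros
  rw [List.getLast?_reverse]
  intro hc
  have := head?_dropWhile_not (fun d => d == 0) ds.reverse 0 hc
  simp at this

theorem horner_val (i : Int) (ds : List Int) : hornerB i ds = valD i ds := by
  induction ds with
  | nil => rfl
  | cons d t ih =>
    unfold hornerB at *
    rw [List.reverse_cons, List.foldl_append, ih]
    simp only [List.foldl, valD]; ring

-- main loop simulation: A's integer state equals the value of B's digit-list state
theorem loop_sim (k : Int) : ∀ (fuel : Nat) (i : Int) (ds : List Int), 2 ≤ i →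
    (∀ d ∈ ds, 0 ≤ d ∧ d < i) → ds.getLast? ≠ some 0 →
    goodsteinLoopA fuel (valD i ds) i k =
      hornerB (loopB k fuel ds i).2 (loopB k fuel ds i).1 := by
  intro fuel
  induction fuel with
  | zero => intro i ds _ _ _; simp [goodsteinLoopA, loopB, horner_val]
  | succ f ih =>
    intro i ds hi hb hn
    have hiff : 0 < valD i ds ↔ ds ≠ [] := by
      constructor
      · intro h hh; subst hh; simp [valD] at h
      · intro h; exact valD_pos i (by omega) ds (fun x hx => (hb x hx).1) hn h
    by_cases hg : i ≤ k ∧ ds ≠ []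
    · obtain ⟨hik, hne⟩ := hg
      have hpos : 0 < valD i ds := hiff.2 hne
      rw [goodsteinLoopA, if_pos ⟨hik, hpos⟩, loopB, if_pos ⟨hik, hne⟩]
      have hdig : pyDigitsA i (valD i ds).toNat (valD i ds) = ds :=
        digitsA_of_rep i hi ds hb hn _ (le_refl _)
      obtain ⟨hbv, hbb⟩ := borrow_spec i hi ds hb hn hne
      have hstepA : (pyResumA i (pyDigitsA i (valD i ds).toNat (valD i ds)) (0, 1)).1 - 1
          = valD (i + 1) (stripZeros (borrowSub1 i ds)) := by
        rw [hdig, resum_val, strip_val, hbv]; ring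
      rw [hstepA]
      exact ih (i + 1) (stripZeros (borrowSub1 i ds)) (by omega)
        (fun x hx => hbb x (strip_mem _ x hx)) (strip_norm _)
    · rw [goodsteinLoopA, loopB, if_neg hg, if_neg ?_, horner_val]
      intro ⟨h1, h2⟩; exact hg ⟨h1, hiff.1 h2⟩

theorem loopA_nonpos (k : Int) (fuel : Nat) (g i : Int) (hg : g ≤ 0) :
    goodsteinLoopA fuel g i k = g := by
  cases fuel with
  | zero => rfl
  | succ f => rw [goodsteinLoopA, if_neg (fun h => by omega)]

-- ===== VERDICT (by name: the statement is the Claim_ definition above) =====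
theorem goodstein_spec : Claim_equal_goodstein := by
  intro n k _
  unfold Spec_goodstein goodstein goodstein_alt
  by_cases h : k < 2 ∨ n ≤ 0
  · rw [if_pos h]
    rcases h with h | h
    · have : (k - 1).toNat = 0 := by omega
      rw [this]; rfl
    · exact loopA_nonpos k _ n 2 h
  · rw [if_neg h]
    rw [not_or, not_lt, not_le] at h
    obtain ⟨hk, hn⟩ := h
    obtain ⟨hval, hbnd, hlast⟩ := digitsB_spec n.toNat n (by omega) (le_refl _)
    have := loop_sim k (k - 1).toNat 2 (digitsB n.toNat n) (by omega) hbnd hlast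
    rw [hval] at this
    exact this
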